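-- pv_equiv track=rewrite | github.com/TheNitromeFan/baekjoon | 12040.py | multiple_starts_or_ends
-- ===== SOURCE A (Python) =====
-- import string
--
-- def multiple_starts_or_ends(words, letter1, letter2):
--     count1, count2 = 0, 0
--     for letter3 in string.ascii_uppercase:
--         if letter1 != letter3 and letter1 + letter3 in words:
--             count1 += 1
--         if letter2 != letter3 and letter2 + letter3 in words:
--             count2 += 1
--     if count1 == count2 == 25:
--         return True
--     count1, count2 = 0, 0
--     for letter3 in string.ascii_uppercase:
--         if letter1 != letter3 and letter3 + letter1 in words:
--             count1 += 1
--         if letter2 != letter3 and letter3 + letter2 in words: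
--             count2 += 1
--     if count1 == count2 == 25:
--         return True
--     return False
-- ===== SOURCE B (Python) =====
-- import string
--
--
-- def _partners(words, letter, at_start):
--     # One pass over the words: parse each word as (stem, partner-letter) for the
--     # given role and collect the distinct uppercase partners of `letter`.
--     n = len(letter)
--     seen = set()
--     for w in words:
--         if len(w) != n + 1:
--             continue
--         if at_start:
--             stem, c = w[:n], w[n]
--         else:
--             c, stem = w[0], w[1:]
--         if stem == letter and c in string.ascii_uppercase and c != letter:
--             seen.add(c)
--     return seen
--
--
-- def multiple_starts_or_ends(words, letter1, letter2):
--     return (len(_partners(words, letter1, True)) == 25 and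
--             len(_partners(words, letter2, True)) == 25) or \
--            (len(_partners(words, letter1, False)) == 25 and
--             len(_partners(words, letter2, False)) == 25)
-- ===== Notes on version B (the rewrite author's own statement) =====
-- stated objective: alternative
-- what changed: Instead of A's two alphabet-scans doing 26 membership tests per role and counting to 25, B makes a single pass over the words, parsing each word into a stem and a partner letter for the given role and collecting the distinct uppercase partners into a set, then compares each set's size to 25.
import Mathlib
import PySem

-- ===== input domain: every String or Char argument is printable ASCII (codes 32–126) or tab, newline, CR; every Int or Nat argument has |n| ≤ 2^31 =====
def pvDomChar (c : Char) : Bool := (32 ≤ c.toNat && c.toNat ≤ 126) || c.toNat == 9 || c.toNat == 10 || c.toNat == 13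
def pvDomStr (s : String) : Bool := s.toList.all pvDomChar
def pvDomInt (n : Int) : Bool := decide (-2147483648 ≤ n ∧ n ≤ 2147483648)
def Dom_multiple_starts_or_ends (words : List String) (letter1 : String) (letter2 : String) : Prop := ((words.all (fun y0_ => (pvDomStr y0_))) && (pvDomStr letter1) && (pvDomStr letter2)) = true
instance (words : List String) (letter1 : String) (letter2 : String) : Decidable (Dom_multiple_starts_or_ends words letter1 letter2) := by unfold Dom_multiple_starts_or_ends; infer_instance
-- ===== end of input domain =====

-- B replaces A's alphabet-scan (26 membership tests per role) by a single pass over the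
-- WORDS, parsing each word into (stem, partner letter) and collecting distinct partner sets (objective: alternative).

-- string.ascii_uppercase as characters; iterating the Python str yields the 1-char strings pvUppercase
def pvUpperChars : List Char :=
  ['A','B','C','D','E','F','G','H','I','J','K','L','M',
   'N','O','P','Q','R','S','T','U','V','W','X','Y','Z']

def pvUppercase : List String := pvUpperChars.map (fun c => String.ofList [c])

-- ===== PORT A =====
def multiple_starts_or_ends (words : List String) (letter1 : String) (letter2 : String) : Bool :=
  let c := pvUppercase.foldl (fun cc letter3 =>
      (if letter1 != letter3 && words.contains (letter1 ++ letter3) then cc.1 + 1 else cc.1,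
       if letter2 != letter3 && words.contains (letter2 ++ letter3) then cc.2 + 1 else cc.2))
      ((0 : Int), (0 : Int))
  if c.1 == 25 && c.2 == 25 then true
  else
    let d := pvUppercase.foldl (fun cc letter3 =>
      (if letter1 != letter3 && words.contains (letter3 ++ letter1) then cc.1 + 1 else cc.1,
       if letter2 != letter3 && words.contains (letter3 ++ letter2) then cc.2 + 1 else cc.2))
      ((0 : Int), (0 : Int))
    if d.1 == 25 && d.2 == 25 then true else false

-- ===== PORT B =====
-- loop body of _partners: w[:n]/w[n] resp. w[0]/w[1:] on a length-(n+1) word become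
-- take/getD/drop on the char list (exact: the index is in range under the length guard);
-- 'c != letter' compares the 1-char string to letter, i.e. [c] ≠ letter.toList
def pvStep (l : List Char) (atStart : Bool) (seen : PySem.Set Char) (w : String) : PySem.Set Char :=
  let cs := w.toList
  if cs.length != l.length + 1 then seen
  else
    let sc := if atStart then (cs.take l.length, cs.getD l.length ' ')
              else (cs.drop 1, cs.getD 0 ' ')
    if sc.1 == l && pvUpperChars.contains sc.2 && [sc.2] != l
    then PySem.Set.add seen sc.2 else seen

-- _partners(words, letter, at_start): the single pass collecting the distinct partners
def pvPartners (words : List String) (letter : String) (atStart : Bool) : PySem.Set Char :=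
  words.foldl (pvStep letter.toList atStart) PySem.Set.empty

def multiple_starts_or_ends_alt (words : List String) (letter1 : String) (letter2 : String) : Bool :=
  (PySem.Set.len (pvPartners words letter1 true) == 25 &&
   PySem.Set.len (pvPartners words letter2 true) == 25) ||
  (PySem.Set.len (pvPartners words letter1 false) == 25 &&
   PySem.Set.len (pvPartners words letter2 false) == 25)

-- ===== PRECONDITION & SPEC =====
def Spec_multiple_starts_or_ends (words : List String) (letter1 : String) (letter2 : String) (out : Bool) : Prop := out = multiple_starts_or_ends_alt words letter1 letter2
instance (words : List String) (letter1 : String) (letter2 : String) (out : Bool) : Decidable (Spec_multiple_starts_or_ends words letter1 letter2 out) := by unfold Spec_multiple_starts_or_ends; infer_instance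

-- ===== CLAIM (what is proved, stated in full; the proofs are below) =====
def Claim_equal_multiple_starts_or_ends : Prop := ∀ (words : List String) (letter1 : String) (letter2 : String), Dom_multiple_starts_or_ends words letter1 letter2 → Spec_multiple_starts_or_ends words letter1 letter2 (multiple_starts_or_ends words letter1 letter2)

-- ===== LEMMAS AND PROOFS =====

lemma foldl_pair_split (L : List String) (p q : String → Bool) (a b : Int) :
    L.foldl (fun cc c => ((if p c then cc.1 + 1 else cc.1), (if q c then cc.2 + 1 else cc.2))) (a, b)
      = (L.foldl (fun n c => if p c then n + 1 else n) a,
         L.foldl (fun n c => if q c then n + 1 else n) b) := by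
  induction L generalizing a b with
  | nil => rfl
  | cons x xs ih => simp [List.foldl_cons, ih]

lemma foldl_count_eq_filter_length (L : List String) (p : String → Bool) (a : Int) :
    L.foldl (fun n c => if p c then n + 1 else n) a = a + ((L.filter p).length : Int) := by
  induction L generalizing a with
  | nil => simp
  | cons x xs ih =>
    by_cases h : p x
    · simp [h, ih]; ring
    · simp [h, ih]

-- parsing a start-role word: the guard chain of pvStep recognizes exactly l ++ [c]
lemma parse_start (cs l : List Char) (c : Char) :
    (cs.length = l.length + 1 ∧ cs.take l.length = l ∧ cs.getD l.length ' ' = c) ↔ cs = l ++ [c] := by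
  constructor
  · rintro ⟨hlen, htake, hget⟩
    have h := List.take_append_drop l.length cs
    have hdlen : (cs.drop l.length).length = 1 := by simp [hlen]
    obtain ⟨x, hx⟩ := List.length_eq_one_iff.mp hdlen
    have hx0 : cs.getD l.length ' ' = x := by
      have h2 : cs.getD l.length ' ' = (cs.drop l.length).getD 0 ' ' := by
        simp [List.getD, List.getElem?_drop]
      rw [h2, hx]; rfl
    rw [← h, htake, hx, ← hx0, hget]
  · rintro rfl
    refine ⟨by simp, by simp, ?_⟩
    simp [List.getD]

lemma parse_end (cs l : List Char) (c : Char) :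
    (cs.length = l.length + 1 ∧ cs.drop 1 = l ∧ cs.getD 0 ' ' = c) ↔ cs = c :: l := by
  cases cs with
  | nil => simp
  | cons a as =>
    simp only [List.length_cons, List.drop_succ_cons, List.drop_zero, List.getD,
      List.getElem?_cons_zero, Option.getD_some, List.cons.injEq]
    constructor
    · rintro ⟨_, rfl, rfl⟩; exact ⟨rfl, rfl⟩
    · rintro ⟨rfl, rfl⟩; exact ⟨rfl, rfl, rfl⟩

-- the step condition of pvStep, seen from the word w with produced partner c
def pvHit (l : List Char) (atStart : Bool) (w : String) (c : Char) : Prop :=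
  c ∈ pvUpperChars ∧ [c] ≠ l ∧ w.toList = (if atStart then l ++ [c] else c :: l)

lemma step_mem (l : List Char) (atStart : Bool) (s : PySem.Set Char) (w : String) (c : Char) :
    c ∈ pvStep l atStart s w ↔ c ∈ s ∨ pvHit l atStart w c := by
  unfold pvStep pvHit
  cases atStart with
  | true =>
    simp only [if_true]
    split_ifs with hlen hcond
    · simp only [bne_iff_ne, ne_eq] at hlen
      constructor
      · exact Or.inl
      · rintro (hs | ⟨_, _, hw⟩)
        · exact hs
        · exact absurd (by simp [hw]) hlen
    · simp only [bne_iff_ne, ne_eq, not_not] at hlen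
      simp only [Bool.and_eq_true, beq_iff_eq, bne_iff_ne, ne_eq, List.contains_iff_mem] at hcond
      obtain ⟨⟨htake, hup⟩, hne⟩ := hcond
      have hw : w.toList = l ++ [w.toList.getD l.length ' '] :=
        (parse_start w.toList l _).mp ⟨hlen, htake, rfl⟩
      rw [PySem.Set.mem_add]
      constructor
      · rintro (hs | rfl)
        · exact Or.inl hs
        · exact Or.inr ⟨hup, hne, by simpa using hw⟩
      · rintro (hs | ⟨_, _, hw'⟩)
        · exact Or.inl hs
        · right
          have := (parse_start w.toList l c).mpr (by simpa using hw')
          exact this.2.2.symm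
    · simp only [bne_iff_ne, ne_eq, not_not] at hlen
      simp only [Bool.and_eq_true, beq_iff_eq, bne_iff_ne, ne_eq, List.contains_iff_mem,
        not_and, not_not] at hcond
      constructor
      · exact Or.inl
      · rintro (hs | ⟨hup, hne, hw⟩)
        · exact hs
        · exfalso
          have hp := (parse_start w.toList l c).mpr (by simpa using hw)
          have hmem' : w.toList.getD l.length ' ' ∈ pvUpperChars := by rw [hp.2.2]; exact hup
          have h5 := hcond ⟨hp.2.1, hmem'⟩
          rw [hp.2.2] at h5
          exact hne h5
  | false =>
    simp only [Bool.false_eq_true, reduceIte]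
    split_ifs with hlen hcond
    · simp only [bne_iff_ne, ne_eq] at hlen
      constructor
      · exact Or.inl
      · rintro (hs | ⟨_, _, hw⟩)
        · exact hs
        · exact absurd (by simp [hw]) hlen
    · simp only [bne_iff_ne, ne_eq, not_not] at hlen
      simp only [Bool.and_eq_true, beq_iff_eq, bne_iff_ne, ne_eq, List.contains_iff_mem] at hcond
      obtain ⟨⟨hdrop, hup⟩, hne⟩ := hcond
      have hw : w.toList = w.toList.getD 0 ' ' :: l :=
        (parse_end w.toList l _).mp ⟨hlen, hdrop, rfl⟩
      rw [PySem.Set.mem_add]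
      constructor
      · rintro (hs | rfl)
        · exact Or.inl hs
        · exact Or.inr ⟨hup, hne, by simpa using hw⟩
      · rintro (hs | ⟨_, _, hw'⟩)
        · exact Or.inl hs
        · right
          have := (parse_end w.toList l c).mpr (by simpa using hw')
          exact this.2.2.symm
    · simp only [bne_iff_ne, ne_eq, not_not] at hlen
      simp only [Bool.and_eq_true, beq_iff_eq, bne_iff_ne, ne_eq, List.contains_iff_mem,
        not_and, not_not] at hcond
      constructor
      · exact Or.inl
      · rintro (hs | ⟨hup, hne, hw⟩)
        · exact hs
        · exfalso
          have hp := (parse_end w.toList l c).mpr (by simpa using hw)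
          have hmem' : w.toList.getD 0 ' ' ∈ pvUpperChars := by rw [hp.2.2]; exact hup
          have h5 := hcond ⟨hp.2.1, hmem'⟩
          rw [hp.2.2] at h5
          exact hne h5

lemma foldl_step_mem (ws : List String) (l : List Char) (atStart : Bool)
    (s : PySem.Set Char) (c : Char) :
    c ∈ ws.foldl (pvStep l atStart) s ↔ c ∈ s ∨ ∃ w ∈ ws, pvHit l atStart w c := by
  induction ws generalizing s with
  | nil => simp
  | cons w ws ih =>
    rw [List.foldl_cons, ih, step_mem]
    simp only [List.mem_cons]
    constructor
    · rintro ((hs | hhit) | ⟨w', hw', hhit⟩)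
      · exact Or.inl hs
      · exact Or.inr ⟨w, Or.inl rfl, hhit⟩
      · exact Or.inr ⟨w', Or.inr hw', hhit⟩
    · rintro (hs | ⟨w', hw' | hw', hhit⟩)
      · exact Or.inl (Or.inl hs)
      · exact Or.inl (Or.inr (hw' ▸ hhit))
      · exact Or.inr ⟨w', hw', hhit⟩

lemma partners_mem (words : List String) (letter : String) (atStart : Bool) (c : Char) :
    c ∈ pvPartners words letter atStart ↔ ∃ w ∈ words, pvHit letter.toList atStart w c := by
  unfold pvPartners
  rw [foldl_step_mem]
  simp [PySem.Set.empty]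

lemma step_nodup (l : List Char) (atStart : Bool) (s : PySem.Set Char) (w : String)
    (hs : s.Nodup) : (pvStep l atStart s w).Nodup := by
  unfold pvStep
  dsimp only
  split_ifs <;> first | exact hs | exact PySem.Set.nodup_add _ _ hs

lemma partners_nodup (words : List String) (letter : String) (atStart : Bool) :
    (pvPartners words letter atStart).Nodup := by
  unfold pvPartners
  have h : ∀ (s : PySem.Set Char), s.Nodup → (words.foldl (pvStep letter.toList atStart) s).Nodup := by
    induction words with
    | nil => intro s hs; simpa using hs
    | cons w ws ih => intro s hs; rw [List.foldl_cons]; exact ih _ (step_nodup _ _ _ _ hs)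
  exact h PySem.Set.empty (by simp [PySem.Set.empty])

lemma string_eq_iff_toList (s t : String) : s = t ↔ s.toList = t.toList :=
  ⟨fun h => h ▸ rfl, String.toList_inj.mp⟩

lemma count_eq_len (words : List String) (letter : String) (atStart : Bool) :
    ((pvUppercase.filter (fun t => letter != t &&
        words.contains (if atStart then letter ++ t else t ++ letter))).length : Int)
      = PySem.Set.len (pvPartners words letter atStart) := by
  have hnodupU : pvUpperChars.Nodup := by decide
  have hmapfilter :
      pvUppercase.filter (fun t => letter != t &&
        words.contains (if atStart then letter ++ t else t ++ letter))
      = (pvUpperChars.filter (fun c => letter != String.ofList [c] &&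
          words.contains (if atStart then letter ++ String.ofList [c] else String.ofList [c] ++ letter))).map
          (fun c => String.ofList [c]) := by
    unfold pvUppercase
    rw [List.filter_map]
    rfl
  rw [hmapfilter, List.length_map]
  have hmem : ∀ c, c ∈ pvUpperChars.filter (fun c => letter != String.ofList [c] &&
          words.contains (if atStart then letter ++ String.ofList [c] else String.ofList [c] ++ letter))
        ↔ c ∈ pvPartners words letter atStart := by
    intro c
    rw [List.mem_filter, partners_mem]
    simp only [Bool.and_eq_true, bne_iff_ne, ne_eq, List.contains_iff_mem]
    constructor
    · rintro ⟨hup, hne, hmem⟩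
      refine ⟨_, hmem, hup, ?_, ?_⟩
      · intro h
        exact hne ((string_eq_iff_toList _ _).mpr (by simpa using h.symm))
      · cases atStart <;> simp
    · rintro ⟨w, hw, hup, hne, hwl⟩
      have hweq : w = (if atStart then letter ++ String.ofList [c] else String.ofList [c] ++ letter) := by
        rw [string_eq_iff_toList]
        cases atStart <;> simpa using hwl
      refine ⟨hup, ?_, hweq ▸ hw⟩
      intro h
      exact hne (by simpa using (congrArg String.toList h).symm)
  have hperm : (pvUpperChars.filter (fun c => letter != String.ofList [c] &&
          words.contains (if atStart then letter ++ String.ofList [c] else String.ofList [c] ++ letter))).Perm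
        (pvPartners words letter atStart) := by
    rw [List.perm_ext_iff_of_nodup (hnodupU.filter _) (partners_nodup words letter atStart)]
    exact hmem
  rw [PySem.Set.len, hperm.length_eq]

-- ===== VERDICT (by name: the statement is the Claim_ definition above) =====
theorem multiple_starts_or_ends_spec : Claim_equal_multiple_starts_or_ends := by
  intro words letter1 letter2 _
  unfold Spec_multiple_starts_or_ends multiple_starts_or_ends multiple_starts_or_ends_alt
  simp only [foldl_pair_split, foldl_count_eq_filter_length, zero_add]
  have h1 := count_eq_len words letter1 true
  have h2 := count_eq_len words letter2 true
  have h3 := count_eq_len words letter1 false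
  have h4 := count_eq_len words letter2 false
  simp only [if_true, Bool.false_eq_true, reduceIte] at h1 h2 h3 h4
  rw [h1, h2, h3, h4]
  split_ifs with ha hb <;> simp_all
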